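-- pv_equiv track=rewrite | github.com/GNS-S/advent-of-code-2025 | 10/part2.py | bounded_combinations
-- ===== SOURCE A (Python) =====
-- def bounded_combinations(bounds: list[int]) -> list[tuple]:
--     '''
--     Return list of positive integer combinations such that for every combination:
--     combination[i] <= bounds[i]
--     '''
--     combinations: list[tuple] = []
--     Q = [tuple()]
--     while Q:
--         sofar = Q.pop()
--         if len(sofar) == len(bounds):
--             combinations.append(sofar)
--             continue
--
--         for i in range(bounds[len(sofar)] + 1):
--             Q.append((*sofar, i))
--
--     return combinations
-- ===== SOURCE B (Python) =====
-- def bounded_combinations(bounds: list[int]) -> list[tuple]: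
--     '''
--     Return list of positive integer combinations such that for every combination:
--     combination[i] <= bounds[i]
--     '''
--     def go(d: int, sofar: tuple) -> list[tuple]:
--         if d == len(bounds):
--             return [sofar]
--         out = []
--         for i in range(bounds[d], -1, -1):
--             out.extend(go(d + 1, (*sofar, i)))
--         return out
--     return go(0, tuple())
-- ===== Notes on version B (the rewrite author's own statement) =====
-- stated objective: simpler
-- what changed: Replaces A's explicit LIFO stack worklist (pushing partially-built tuples and popping them) with a direct recursion that extends the combination one position at a time, iterating each level's range downward to preserve the reverse-lexicographic output order.
import Mathlib
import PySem

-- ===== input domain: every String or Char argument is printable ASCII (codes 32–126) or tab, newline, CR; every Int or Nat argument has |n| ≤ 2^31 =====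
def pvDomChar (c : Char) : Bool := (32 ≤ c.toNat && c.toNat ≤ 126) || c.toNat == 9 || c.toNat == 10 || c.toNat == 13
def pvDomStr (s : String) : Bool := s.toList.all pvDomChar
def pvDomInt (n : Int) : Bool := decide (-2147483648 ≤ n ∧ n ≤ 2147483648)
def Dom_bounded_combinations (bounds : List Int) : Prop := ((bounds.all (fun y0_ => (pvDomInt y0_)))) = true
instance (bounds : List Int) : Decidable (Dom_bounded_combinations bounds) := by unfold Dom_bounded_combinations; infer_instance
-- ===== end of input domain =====

-- B replaces A's explicit stack worklist by a recursive helper that extends the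
-- combination position by position (iterating each level downward, preserving A's
-- reverse-lexicographic output order); objective: simpler. A is total; no Pre_.

-- ===== PORT A =====
-- weight of a stack entry of length l: product of (bounds[j]+2) (at least 1) for the
-- remaining positions; used only for the termination measure of the while-loop.
def bcFac (b : Int) : Nat := ((b + 2).toNat).max 1

def bcWeight (bounds : List Int) (l : Nat) : Nat := ((bounds.drop l).map bcFac).prod

def bcMeasure (bounds : List Int) (Q : List (List Int)) : Nat :=
  (Q.map (fun s => bcWeight bounds s.length)).sum

theorem bcFac_pos (b : Int) : 0 < bcFac b := by simp [bcFac]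

theorem bcWeight_pos (bounds : List Int) (l : Nat) : 0 < bcWeight bounds l := by
  unfold bcWeight
  exact List.prod_pos (by intro x hx; rcases List.mem_map.1 hx with ⟨b, _, rfl⟩; exact bcFac_pos b)

theorem bcWeight_drop (bounds : List Int) (l : Nat) (b : Int)
    (h : bounds.drop l = b :: bounds.drop (l + 1)) :
    bcWeight bounds l = bcFac b * bcWeight bounds (l + 1) := by
  unfold bcWeight; rw [h]; simp

-- the while-loop of A: Q is the Python stack with its TOP at the head (Q.pop pops
-- the head; the `for i in range(...)` pushes i = 0..b in order, so the reversed
-- block sits on top with i = b first).  The `none` branch mirrors the IndexError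
-- bounds[len(sofar)] would raise; it is unreachable from the initial stack [()].
def bcLoop (bounds : List Int) (Q acc : List (List Int)) : List (List Int) :=
  match Q with
  | [] => acc
  | sofar :: rest =>
    if sofar.length = bounds.length then
      bcLoop bounds rest (acc ++ [sofar])
    else
      match _h : PySem.List.pyGet? bounds (sofar.length : Int) with
      | none => bcLoop bounds rest acc
      | some b =>
        bcLoop bounds
          ((((PySem.List.pyRange 0 (b + 1) 1).map (fun i => sofar ++ [i])).reverse) ++ rest)
          acc
termination_by bcMeasure bounds Q
decreasing_by
  · have := bcWeight_pos bounds sofar.length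
    simp [bcMeasure]; omega
  · have := bcWeight_pos bounds sofar.length
    simp [bcMeasure]; omega
  · simp only [bcMeasure, List.map_append, List.sum_append, List.map_cons, List.sum_cons,
      List.map_reverse, List.sum_reverse, List.map_map]
    have hmap : ((PySem.List.pyRange 0 (b + 1) 1).map
        ((fun s => bcWeight bounds s.length) ∘ fun i => sofar ++ [i]))
        = (PySem.List.pyRange 0 (b + 1) 1).map (fun _ => bcWeight bounds (sofar.length + 1)) := by
      apply List.map_congr_left; intro i _; simp
    rw [hmap, List.map_const', List.sum_replicate, smul_eq_mul, PySem.List.length_pyRange_one]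
    have hb : bounds[sofar.length]? = some b := by
      rw [← PySem.List.pyGet?_natCast]; exact _h
    have hdrop : bounds.drop sofar.length = b :: bounds.drop (sofar.length + 1) := by
      have := List.getElem?_eq_some_iff.1 hb
      rcases this with ⟨hl, hbeq⟩
      rw [List.drop_eq_getElem_cons hl, hbeq]
    have hw := bcWeight_drop bounds sofar.length b hdrop
    have hwpos := bcWeight_pos bounds (sofar.length + 1)
    have hfac : (b + 1 - 0).toNat < bcFac b := by
      simp [bcFac]; omega
    have : (b + 1 - 0).toNat * bcWeight bounds (sofar.length + 1)
        < bcFac b * bcWeight bounds (sofar.length + 1) :=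
      (Nat.mul_lt_mul_right hwpos).2 hfac
    omega

def bounded_combinations (bounds : List Int) : List (List Int) :=
  bcLoop bounds [[]] []

-- ===== PORT B =====
-- go d sofar: structural recursion on the bounds not yet consumed (the suffix
-- bounds.drop d of Source B's index recursion); each level iterates range(bounds[d], -1, -1).
def bcGo (sofar : List Int) : List Int → List (List Int)
  | [] => [sofar]
  | b :: rest =>
    (PySem.List.pyRange b (-1) (-1)).flatMap (fun i => bcGo (sofar ++ [i]) rest)

def bounded_combinations_alt (bounds : List Int) : List (List Int) :=
  bcGo [] bounds

-- ===== PRECONDITION & SPEC =====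
def Spec_bounded_combinations (bounds : List Int) (out : List (List Int)) : Prop := out = bounded_combinations_alt bounds
instance (bounds : List Int) (out : List (List Int)) : Decidable (Spec_bounded_combinations bounds out) := by unfold Spec_bounded_combinations; infer_instance

-- ===== CLAIM (what is proved, stated in full; the proofs are below) =====
def Claim_equal_bounded_combinations : Prop := ∀ (bounds : List Int), Dom_bounded_combinations bounds → Spec_bounded_combinations bounds (bounded_combinations bounds)

-- ===== LEMMAS AND PROOFS =====

-- the loop invariant: while every stack entry has length ≤ |bounds|, the loop
-- returns acc followed by each entry expanded by B's recursive helper.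
theorem bcLoop_eq (bounds : List Int) (Q acc : List (List Int))
    (hQ : ∀ s ∈ Q, s.length ≤ bounds.length) :
    bcLoop bounds Q acc = acc ++ Q.flatMap (fun s => bcGo s (bounds.drop s.length)) := by
  induction Q, acc using bcLoop.induct bounds with
  | case1 acc => simp [bcLoop]
  | case2 acc sofar rest hlen ih =>
    rw [bcLoop]
    simp only [if_pos hlen]
    rw [ih (fun s hs => hQ s (List.mem_cons_of_mem _ hs))]
    have : bounds.drop sofar.length = [] := by rw [hlen]; simp
    simp [this, bcGo]
  | case3 acc sofar rest hlen hnone ih =>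
    -- unreachable: pyGet? at a nonnegative index ≤ length, ≠ length, is some
    exfalso
    have hle := hQ sofar (List.mem_cons_self)
    have hlt : sofar.length < bounds.length := lt_of_le_of_ne hle hlen
    rw [PySem.List.pyGet?_natCast, List.getElem?_eq_getElem hlt] at hnone
    simp at hnone
  | case4 acc sofar rest hlen b hbeq ih =>
    rw [bcLoop]
    simp only [if_neg hlen]
    have hle := hQ sofar (List.mem_cons_self)
    have hlt : sofar.length < bounds.length := lt_of_le_of_ne hle hlen
    have hsome := hbeq
    rw [PySem.List.pyGet?_natCast, List.getElem?_eq_getElem hlt] at hsome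
    have hb : bounds[sofar.length] = b := Option.some.inj hsome
    have hdrop : bounds.drop sofar.length = b :: bounds.drop (sofar.length + 1) := by
      rw [List.drop_eq_getElem_cons hlt, hb]
    split
    all_goals rename_i heq
    · rw [hbeq] at heq; cases heq
    rw [hbeq] at heq
    injection heq with hbb
    subst hbb
    rw [ih]
    · simp only [List.flatMap_cons, List.flatMap_append, List.flatMap_reverse,
        List.flatMap_map]
      rw [hdrop]
      simp only [bcGo]
      congr 1
      rw [PySem.List.pyRange_neg_one_eq_reverse]
      norm_num
      rw [List.flatMap_reverse]
      simp [Function.comp_def]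
    · intro s hs
      rcases List.mem_append.1 hs with hs | hs
      · rcases List.mem_reverse.1 hs with hs
        rcases List.mem_map.1 hs with ⟨i, _, rfl⟩
        simp; omega
      · exact hQ s (List.mem_cons_of_mem _ hs)

-- ===== VERDICT (by name: the statement is the Claim_ definition above) =====
theorem bounded_combinations_spec : Claim_equal_bounded_combinations := by
  intro bounds _
  unfold Spec_bounded_combinations bounded_combinations bounded_combinations_alt
  rw [bcLoop_eq bounds [[]] [] (by simp)]
  simp
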